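-- pv_equiv track=rewrite | github.com/zxxia/benchmarking | glimpse_interface/Glimpse.py | object_appearance
-- ===== SOURCE A (Python) =====
-- def object_appearance(start, end, gt):
--     """Take start frame, end frame, and groundtruth.
--
--     Return
--         object to frame range (dict)
--         frame id to new object id (dict)
--
--     """
--     obj_to_frame_range = dict()
--     frame_to_new_obj = dict()
--     for frame_id in range(int(start), int(end)+1):
--         if frame_id not in gt:
--             continue
--         boxes = gt[frame_id]
--         for box in boxes:
--             try:
--                 obj_id = int(box[-1])
--             except ValueError:
--                 obj_id = box[-1]
--
--             if obj_id in obj_to_frame_range: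
--                 start, end = obj_to_frame_range[obj_id]
--                 obj_to_frame_range[obj_id][0] = min(int(frame_id), start)
--                 obj_to_frame_range[obj_id][1] = max(int(frame_id), end)
--             else:
--                 obj_to_frame_range[obj_id] = [int(frame_id), int(frame_id)]
--
--     for obj_id in obj_to_frame_range:
--         if obj_to_frame_range[obj_id][0] in frame_to_new_obj:
--             frame_to_new_obj[obj_to_frame_range[obj_id][0]].append(obj_id)
--         else:
--             frame_to_new_obj[obj_to_frame_range[obj_id][0]] = [obj_id]
--
--     return obj_to_frame_range, frame_to_new_obj
-- ===== SOURCE B (Python) =====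
-- def object_appearance(start, end, gt):
--     """Same result as A via a different decomposition: first collect each
--     object's full frame list, then take min/max, then group by first frame."""
--     frames_of = {}
--     for frame_id in range(int(start), int(end) + 1):
--         if frame_id not in gt:
--             continue
--         for box in gt[frame_id]:
--             try:
--                 obj_id = int(box[-1])
--             except ValueError:
--                 obj_id = box[-1]
--             frames_of.setdefault(obj_id, []).append(int(frame_id))
--     obj_to_frame_range = {o: [min(fs), max(fs)] for o, fs in frames_of.items()}
--     frame_to_new_obj = {}
--     for o, rng in obj_to_frame_range.items():
--         frame_to_new_obj.setdefault(rng[0], []).append(o)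
--     return obj_to_frame_range, frame_to_new_obj
-- ===== Notes on version B (the rewrite author's own statement) =====
-- stated objective: alternative
-- what changed: B decomposes the work into three passes: it first collects every frame id per object into a dict of frame lists, then builds obj_to_frame_range as [min(fs), max(fs)] per object, then groups objects by their first frame, instead of A's single pass that keeps a running min/max and mutates the range list in place.
import Mathlib
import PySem

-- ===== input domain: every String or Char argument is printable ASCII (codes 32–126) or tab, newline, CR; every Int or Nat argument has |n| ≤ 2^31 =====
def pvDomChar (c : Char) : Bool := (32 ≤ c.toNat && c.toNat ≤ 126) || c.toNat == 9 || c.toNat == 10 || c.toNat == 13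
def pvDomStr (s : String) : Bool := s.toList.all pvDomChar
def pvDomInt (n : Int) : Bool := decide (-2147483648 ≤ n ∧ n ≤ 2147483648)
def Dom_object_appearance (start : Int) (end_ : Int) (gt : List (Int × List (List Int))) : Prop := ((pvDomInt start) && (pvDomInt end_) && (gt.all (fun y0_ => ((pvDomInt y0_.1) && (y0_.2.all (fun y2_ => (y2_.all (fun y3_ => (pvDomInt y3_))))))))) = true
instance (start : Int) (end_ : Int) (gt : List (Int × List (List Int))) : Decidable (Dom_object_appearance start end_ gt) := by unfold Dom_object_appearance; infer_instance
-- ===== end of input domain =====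

-- B replaces A's single running-min/max pass by three passes (collect frame lists per object,
-- then min/max per object, then group by first frame); same return value (objective: alternative).

-- ===== PORT A =====
def object_appearance (start : Int) (end_ : Int) (gt : List (Int × List (List Int))) : (List (Int × List Int)) × (List (Int × List Int)) :=
  let gtd : PySem.Dict Int (List (List Int)) := PySem.Dict.ofList gt
  let otr : PySem.Dict Int (List Int) :=
    (PySem.List.pyRange start (end_ + 1) 1).foldl (fun otr frame_id =>
      match gtd.get? frame_id with
      | none => otr                                    -- 'if frame_id not in gt: continue'
      | some boxes =>
        boxes.foldl (fun otr box =>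
          match PySem.List.pyGet? box (-1) with        -- int(box[-1]); box entries are ints, so the ValueError branch never fires
          | none => otr                                -- IndexError on an empty box: excluded by Pre_
          | some obj_id =>
            match otr.get? obj_id with
            | some [lo, hi] => otr.insert obj_id [min frame_id lo, max frame_id hi]
            | some _ => otr                            -- unreachable: stored ranges always have two entries
            | none => otr.insert obj_id [frame_id, frame_id]) otr) PySem.Dict.empty
  let ftn : PySem.Dict Int (List Int) :=
    otr.items.foldl (fun ftn p =>
      match otr.get? p.1 with
      | none => ftn                                    -- unreachable: p.1 is a key of otr
      | some rng =>
        match PySem.List.pyGet? rng 0 with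
        | none => ftn                                  -- unreachable: rng has two entries
        | some k =>
          match ftn.get? k with
          | some l => ftn.insert k (l ++ [p.1])
          | none => ftn.insert k [p.1]) PySem.Dict.empty
  (otr.items, ftn.items)

-- ===== PORT B =====
def object_appearance_alt (start : Int) (end_ : Int) (gt : List (Int × List (List Int))) : (List (Int × List Int)) × (List (Int × List Int)) :=
  let gtd : PySem.Dict Int (List (List Int)) := PySem.Dict.ofList gt
  -- pass 1: frames_of[obj_id] = list of frames the object appears in
  let fo : PySem.Dict Int (List Int) :=
    (PySem.List.pyRange start (end_ + 1) 1).foldl (fun fo frame_id =>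
      match gtd.get? frame_id with
      | none => fo
      | some boxes =>
        boxes.foldl (fun fo box =>
          match PySem.List.pyGet? box (-1) with
          | none => fo                                 -- IndexError on an empty box: excluded by Pre_
          | some obj_id => fo.modify obj_id [] (· ++ [frame_id])) fo) PySem.Dict.empty   -- setdefault(obj_id, []).append(frame_id)
  -- pass 2: obj_to_frame_range = {o: [min(fs), max(fs)]}
  let otr : List (Int × List Int) :=
    fo.items.map (fun p => (p.1, [(PySem.List.min? p.2 (fun x => x)).getD 0, (PySem.List.max? p.2 (fun x => x)).getD 0]))
  -- pass 3: group objects under their first frame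
  let ftn : PySem.Dict Int (List Int) :=
    otr.foldl (fun ftn p => ftn.modify (p.2.headD 0) [] (· ++ [p.1])) PySem.Dict.empty   -- setdefault(rng[0], []).append(o)
  (otr, ftn.items)

-- ===== PRECONDITION & SPEC =====
-- Pre_ excludes exactly the inputs where some box looked at (its frame key lies in [start, end])
-- is the empty list: there Python A raises IndexError on box[-1] (and so does B).
def Pre_object_appearance (start : Int) (end_ : Int) (gt : List (Int × List (List Int))) : Prop :=
  ∀ p ∈ (PySem.Dict.ofList gt).items, start ≤ p.1 → p.1 ≤ end_ → ∀ b ∈ p.2, b ≠ []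
instance (start : Int) (end_ : Int) (gt : List (Int × List (List Int))) : Decidable (Pre_object_appearance start end_ gt) := by unfold Pre_object_appearance; infer_instance
def pvWitness_object_appearance : Int × Int × (List (Int × List (List Int))) := (0, 2, [(1, [[3, 7]]), (2, [[4, 7], [5, 9]])])
def Spec_object_appearance (start : Int) (end_ : Int) (gt : List (Int × List (List Int))) (out : (List (Int × List Int)) × (List (Int × List Int))) : Prop := out = object_appearance_alt start end_ gt
instance (start : Int) (end_ : Int) (gt : List (Int × List (List Int))) (out : (List (Int × List Int)) × (List (Int × List Int))) : Decidable (Spec_object_appearance start end_ gt out) := by unfold Spec_object_appearance; infer_instance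

-- ===== CLAIM (what is proved, stated in full; the proofs are below) =====
def Claim_equal_object_appearance : Prop := ∀ (start : Int) (end_ : Int) (gt : List (Int × List (List Int))), Dom_object_appearance start end_ gt → Pre_object_appearance start end_ gt → Spec_object_appearance start end_ gt (object_appearance start end_ gt)

-- ===== LEMMAS AND PROOFS =====

-- [min(fs), max(fs)] as B computes it
def pvMm (fs : List Int) : List Int :=
  [(PySem.List.min? fs (fun x => x)).getD 0, (PySem.List.max? fs (fun x => x)).getD 0]

-- invariant relating A's running-range dict to B's frame-list dict
def pvRel (otr fo : PySem.Dict Int (List Int)) : Prop :=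
  otr = PySem.Dict.mk (fo.items.map (fun p => (p.1, pvMm p.2))) ∧
  (∀ p ∈ fo.items, p.2 ≠ []) ∧ fo.keys.Nodup

theorem pv_get?_mk_map (l : List (Int × List Int)) (k : Int) :
    (PySem.Dict.mk (l.map (fun p => (p.1, pvMm p.2)))).get? k
      = ((PySem.Dict.mk l).get? k).map pvMm := by
  induction l with
  | nil => rfl
  | cons p t ih =>
    obtain ⟨pk, pv⟩ := p
    simp only [List.map_cons, PySem.Dict.get?_mk_cons]
    by_cases hpk : (pk == k) = true
    · rw [if_pos hpk, if_pos hpk]; rfl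
    · rw [if_neg hpk, if_neg hpk]; exact ih

theorem pvMm_append (x f : Int) (t : List Int) :
    pvMm ((x :: t) ++ [f])
      = [min f ((PySem.List.min? (x :: t) (fun y => y)).getD 0),
         max f ((PySem.List.max? (x :: t) (fun y => y)).getD 0)] := by
  simp [pvMm, PySem.List.min?_id_cons, PySem.List.max?_id_cons, List.foldl_append,
    min_comm, max_comm]

theorem pv_modify_eq (ftn : PySem.Dict Int (List Int)) (k o : Int) :
    (match ftn.get? k with
     | some l => ftn.insert k (l ++ [o])
     | none => ftn.insert k [o]) = ftn.modify k [] (· ++ [o]) := by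
  simp only [PySem.Dict.modify, PySem.Dict.getD_eq_get?_getD]
  cases ftn.get? k <;> simp

theorem pv_rel_step (f o : Int) (otr fo : PySem.Dict Int (List Int)) (h : pvRel otr fo) :
    pvRel (match otr.get? o with
           | some [lo, hi] => otr.insert o [min f lo, max f hi]
           | some _ => otr
           | none => otr.insert o [f, f])
          (fo.modify o [] (· ++ [f])) := by
  obtain ⟨hmap, hne, hnd⟩ := h
  have hget : otr.get? o = (fo.get? o).map pvMm := by
    rw [hmap]; exact pv_get?_mk_map fo.items o
  cases hfo : fo.get? o with
  | none =>
    have hcf : fo.contains o = false := by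
      rw [PySem.Dict.contains_eq_isSome_get?, hfo]; rfl
    have hco : otr.contains o = false := by
      rw [PySem.Dict.contains_eq_isSome_get?, hget, hfo]; rfl
    have hgd : fo.getD o [] = [] := by
      rw [PySem.Dict.getD_eq_get?_getD, hfo]; rfl
    rw [hget, hfo]
    show pvRel (otr.insert o [f, f]) (fo.modify o [] (· ++ [f]))
    refine ⟨?_, ?_, ?_⟩
    · apply PySem.Dict.ext
      rw [PySem.Dict.items_insert_of_not_contains _ _ hco]
      show _ = (PySem.Dict.mk (((fo.modify o [] (· ++ [f]))).items.map _)).items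
      simp only [PySem.Dict.modify]
      rw [hgd, PySem.Dict.items_insert_of_not_contains _ _ hcf, hmap]
      simp [pvMm, PySem.List.min?_id_cons, PySem.List.max?_id_cons]
    · intro p hp
      simp only [PySem.Dict.modify] at hp
      rw [hgd, PySem.Dict.items_insert_of_not_contains _ _ hcf] at hp
      rcases List.mem_append.mp hp with h1 | h1
      · exact hne p h1
      · simp at h1; simp [h1]
    · simp only [PySem.Dict.modify]; exact PySem.Dict.nodup_keys_insert _ _ _ hnd
  | some fs =>
    have hmem : (o, fs) ∈ fo.items := PySem.Dict.mem_items_of_get?_eq_some fo hfo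
    have hfs : fs ≠ [] := hne _ hmem
    obtain ⟨x, t, rfl⟩ : ∃ x t, fs = x :: t := by
      cases fs with | nil => exact absurd rfl hfs | cons a b => exact ⟨a, b, rfl⟩
    have hct : fo.contains o = true := by
      rw [PySem.Dict.contains_eq_isSome_get?, hfo]; rfl
    have hco : otr.contains o = true := by
      rw [PySem.Dict.contains_eq_isSome_get?, hget, hfo]; rfl
    have hgd : fo.getD o [] = x :: t := by
      rw [PySem.Dict.getD_eq_get?_getD, hfo]; rfl
    -- key uniqueness: any item of fo with key o has value x :: t
    have huniq : ∀ p ∈ fo.items, p.1 = o → p.2 = x :: t := by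
      intro p hp hpk
      have : fo.get? p.1 = some p.2 := PySem.Dict.get?_of_mem_items fo (by exact hp) hnd
      rw [hpk, hfo] at this; exact (Option.some.injEq _ _).mp this.symm
    rw [hget, hfo]
    show pvRel (otr.insert o [min f ((PySem.List.min? (x :: t) (fun y => y)).getD 0),
                              max f ((PySem.List.max? (x :: t) (fun y => y)).getD 0)]) _
    refine ⟨?_, ?_, ?_⟩
    · apply PySem.Dict.ext
      rw [PySem.Dict.items_insert_of_contains _ _ hco]
      show _ = (PySem.Dict.mk (((fo.modify o [] (· ++ [f]))).items.map _)).items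
      simp only [PySem.Dict.modify]
      rw [hgd, PySem.Dict.items_insert_of_contains _ _ hct, hmap]
      show List.map _ (List.map _ fo.items) = List.map _ (List.map _ fo.items)
      rw [List.map_map, List.map_map]
      apply List.map_congr_left
      intro p hp
      by_cases hpk : p.1 = o
      · have hpv := huniq p hp hpk
        simp only [Function.comp_apply, hpk, hpv, beq_self_eq_true, if_true]
        rw [pvMm_append]
      · simp [Function.comp, hpk]
    · intro p hp
      simp only [PySem.Dict.modify] at hp
      rw [hgd, PySem.Dict.items_insert_of_contains _ _ hct] at hp
      obtain ⟨q, hq, hqe⟩ := List.mem_map.mp hp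
      by_cases hqk : q.1 = o
      · rw [if_pos (by exact beq_iff_eq.mpr hqk)] at hqe
        rw [← hqe]; simp
      · rw [if_neg (by simp [hqk])] at hqe
        rw [← hqe]; exact hne q hq
    · simp only [PySem.Dict.modify]; exact PySem.Dict.nodup_keys_insert _ _ _ hnd

theorem pv_rel_inner (f : Int) (boxes : List (List Int)) (otr fo : PySem.Dict Int (List Int))
    (h : pvRel otr fo) :
    pvRel (boxes.foldl (fun otr box =>
            match PySem.List.pyGet? box (-1) with
            | none => otr
            | some obj_id =>
              match otr.get? obj_id with
              | some [lo, hi] => otr.insert obj_id [min f lo, max f hi]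
              | some _ => otr
              | none => otr.insert obj_id [f, f]) otr)
          (boxes.foldl (fun fo box =>
            match PySem.List.pyGet? box (-1) with
            | none => fo
            | some obj_id => fo.modify obj_id [] (· ++ [f])) fo) := by
  induction boxes generalizing otr fo with
  | nil => exact h
  | cons b t ih =>
    simp only [List.foldl_cons]
    cases hb : PySem.List.pyGet? b (-1) with
    | none => exact ih _ _ h
    | some o => exact ih _ _ (pv_rel_step f o otr fo h)

theorem pv_rel_outer (gtd : PySem.Dict Int (List (List Int))) (frames : List Int)
    (otr fo : PySem.Dict Int (List Int)) (h : pvRel otr fo) :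
    pvRel (frames.foldl (fun otr frame_id =>
            match gtd.get? frame_id with
            | none => otr
            | some boxes =>
              boxes.foldl (fun otr box =>
                match PySem.List.pyGet? box (-1) with
                | none => otr
                | some obj_id =>
                  match otr.get? obj_id with
                  | some [lo, hi] => otr.insert obj_id [min frame_id lo, max frame_id hi]
                  | some _ => otr
                  | none => otr.insert obj_id [frame_id, frame_id]) otr) otr)
          (frames.foldl (fun fo frame_id =>
            match gtd.get? frame_id with
            | none => fo
            | some boxes =>
              boxes.foldl (fun fo box =>
                match PySem.List.pyGet? box (-1) with
                | none => fo
                | some obj_id => fo.modify obj_id [] (· ++ [frame_id])) fo) fo) := by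
  induction frames generalizing otr fo with
  | nil => exact h
  | cons fr t ih =>
    simp only [List.foldl_cons]
    cases hf : gtd.get? fr with
    | none => exact ih _ _ h
    | some boxes => exact ih _ _ (pv_rel_inner fr boxes otr fo h)

theorem pv_main (start end_ : Int) (gt : List (Int × List (List Int))) :
    object_appearance start end_ gt = object_appearance_alt start end_ gt := by
  simp only [object_appearance, object_appearance_alt]
  set gtd := PySem.Dict.ofList gt with hgtd
  set fo := (PySem.List.pyRange start (end_ + 1) 1).foldl (fun fo frame_id =>
      match gtd.get? frame_id with
      | none => fo
      | some boxes =>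
        boxes.foldl (fun fo box =>
          match PySem.List.pyGet? box (-1) with
          | none => fo
          | some obj_id => fo.modify obj_id [] (· ++ [frame_id])) fo) PySem.Dict.empty with hfo
  have hrel : pvRel ((PySem.List.pyRange start (end_ + 1) 1).foldl (fun otr frame_id =>
      match gtd.get? frame_id with
      | none => otr
      | some boxes =>
        boxes.foldl (fun otr box =>
          match PySem.List.pyGet? box (-1) with
          | none => otr
          | some obj_id =>
            match otr.get? obj_id with
            | some [lo, hi] => otr.insert obj_id [min frame_id lo, max frame_id hi]
            | some _ => otr
            | none => otr.insert obj_id [frame_id, frame_id]) otr) PySem.Dict.empty) fo := by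
    rw [hfo]
    exact pv_rel_outer gtd _ _ _ ⟨by apply PySem.Dict.ext; rfl, by simp [PySem.Dict.empty],
      PySem.Dict.nodup_keys_empty⟩
  obtain ⟨hmap, hne, hnd⟩ := hrel
  rw [hmap]
  have hL : (PySem.Dict.mk (fo.items.map (fun p => (p.1, pvMm p.2)))).items
      = fo.items.map (fun p => (p.1, pvMm p.2)) := rfl
  refine Prod.ext ?_ ?_
  · simp [pvMm]
  · have hsame : (fo.items.map (fun p => (p.1, pvMm p.2))).foldl (fun ftn p =>
        match (PySem.Dict.mk (fo.items.map (fun p => (p.1, pvMm p.2)))).get? p.1 with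
        | none => ftn
        | some rng =>
          match PySem.List.pyGet? rng 0 with
          | none => ftn
          | some k =>
            match ftn.get? k with
            | some l => ftn.insert k (l ++ [p.1])
            | none => ftn.insert k [p.1]) PySem.Dict.empty
        = (fo.items.map (fun p => (p.1, pvMm p.2))).foldl (fun ftn p =>
            ftn.modify (p.2.headD 0) [] (· ++ [p.1])) PySem.Dict.empty := by
      apply PySem.List.foldl_congr_mem'
      intro p hp ftn
      obtain ⟨q, hq, rfl⟩ := List.mem_map.mp hp
      have hgq : (PySem.Dict.mk (fo.items.map (fun p => (p.1, pvMm p.2)))).get? q.1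
          = some (pvMm q.2) := by
        rw [pv_get?_mk_map]
        have : (PySem.Dict.mk fo.items).get? q.1 = some q.2 :=
          PySem.Dict.get?_of_mem_items fo (by exact hq) hnd
        rw [this]; rfl
      rw [hgq]
      show (match PySem.List.pyGet? (pvMm q.2) 0 with
            | none => ftn
            | some k =>
              match ftn.get? k with
              | some l => ftn.insert k (l ++ [q.1])
              | none => ftn.insert k [q.1])
          = ftn.modify ((pvMm q.2).headD 0) [] (· ++ [q.1])
      rw [show PySem.List.pyGet? (pvMm q.2) 0 = some ((pvMm q.2).headD 0) from by
        simp [pvMm]]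
      exact pv_modify_eq ftn ((pvMm q.2).headD 0) q.1
    rw [hL, hsame]
    rfl

-- ===== VERDICT (by name: the statement is the Claim_ definition above) =====
theorem object_appearance_spec : Claim_equal_object_appearance := by
  intro start end_ gt _ _
  unfold Spec_object_appearance
  exact pv_main start end_ gt
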